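-- pv_equiv track=rewrite | github.com/hyeonzi423/Algorithm | 프로그래머스/unrated/134240. 푸드 파이트 대회/푸드 파이트 대회.py | solution
-- ===== SOURCE A (Python) =====
-- from collections import deque
--
-- def solution(food):
--     res = [0]
--     res = deque(res)
--     index = len(food) - 1
--     for i in food[::-1]:
--         half = i // 2
--         for j in range(half):
--             res.append(str(index))
--             res.appendleft(str(index))
--         index -= 1
--     answer = ''
--     for i in res:
--         answer += str(i)
--     return answer
-- ===== SOURCE B (Python) =====
-- def solution(food):
--     blocks = [str(i) * (food[i] // 2) for i in range(len(food))]
--     return ''.join(blocks) + '0' + ''.join(reversed(blocks))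
-- ===== Notes on version B (the rewrite author's own statement) =====
-- stated objective: simpler
-- what changed: Replaces the deque grown at both ends by symmetric nested append/appendleft loops plus a final element-by-element '+=' join with a one-pass comprehension building the list of half-blocks, returned as ''.join(blocks) + '0' + ''.join(reversed(blocks)) — the mirror half comes from reversing the block list instead of two-sided incremental construction.
import Mathlib
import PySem

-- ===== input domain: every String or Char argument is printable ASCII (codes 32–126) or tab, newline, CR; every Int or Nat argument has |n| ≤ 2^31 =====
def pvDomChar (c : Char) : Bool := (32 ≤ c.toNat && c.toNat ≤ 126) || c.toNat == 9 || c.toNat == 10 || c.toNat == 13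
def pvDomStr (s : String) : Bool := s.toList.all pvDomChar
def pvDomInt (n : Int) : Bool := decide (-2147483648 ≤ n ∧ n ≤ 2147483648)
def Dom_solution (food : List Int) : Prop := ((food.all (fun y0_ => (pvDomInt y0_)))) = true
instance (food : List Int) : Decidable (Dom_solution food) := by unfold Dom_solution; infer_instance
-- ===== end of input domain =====

-- B builds the list of half-blocks str(i)*(food[i]//2) in one comprehension and mirrors it
-- (join(blocks) + '0' + join(reversed(blocks))) instead of A's deque grown at both ends by
-- nested loops; objective: simpler. Strings are modeled on the List Char side (PySem convention).

-- ===== PORT A =====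
-- res : deque of strings, modeled as List (List Char); its initial element is the int 0, which
-- the final 'str(i)' loop prints as str(0) = PySem.Int.toChars 0, so it is stored as such.
-- food[::-1] is food.reverse (PySem.List.slice?_none_none_neg_one); 'half' is inlined into the
-- range; the inner loop appends str(index) on the right (r ++ [·]) and on the left (· :: r).
def solution (food : List Int) : String :=
  let st := (food.reverse).foldl
    (fun (st : List (List Char) × Int) (i : Int) =>
      ((PySem.List.pyRange 0 (PySem.Int.floordiv i 2) 1).foldl
         (fun r _ => PySem.Int.toChars st.2 :: (r ++ [PySem.Int.toChars st.2])) st.1,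
       st.2 - 1))
    ([PySem.Int.toChars 0], PySem.List.len food - 1)
  let answer := st.1.foldl (fun a s => a ++ s) ([] : List Char)
  String.ofList answer

-- ===== PORT B =====
-- blocks = [str(i) * (food[i] // 2) for i in range(len(food))]; ''.join is flatten.
def solution_alt (food : List Int) : String :=
  let blocks : List (List Char) := (List.range food.length).map
    (fun (i : Nat) => PySem.List.pyRepeat (PySem.Int.toChars (i : Int))
                (PySem.Int.floordiv (PySem.List.pyGetD food (i : Int) 0) 2))
  String.ofList (blocks.flatten ++ ['0'] ++ blocks.reverse.flatten)

-- ===== PRECONDITION & SPEC =====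
def Spec_solution (food : List Int) (out : String) : Prop := out = solution_alt food
instance (food : List Int) (out : String) : Decidable (Spec_solution food out) := by unfold Spec_solution; infer_instance

-- ===== CLAIM (what is proved, stated in full; the proofs are below) =====
def Claim_equal_solution : Prop := ∀ (food : List Int), Dom_solution food → Spec_solution food (solution food)

-- ===== LEMMAS AND PROOFS =====

-- one half-block of A, as a list of (repeated) strings
def pvBlk (m : Int) (f : Int) : List (List Char) :=
  List.replicate (PySem.Int.floordiv f 2).toNat (PySem.Int.toChars m)

-- the left half of A's deque, accumulated over the (reversed) food list
def pvW : List Int → Int → List (List Char)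
  | [], _ => []
  | f :: fs, m => pvW fs (m - 1) ++ pvBlk m f

-- the inner 'for j in range(half)' loop wraps l.length copies of s around r0
lemma pvInner (l : List Int) (s : List Char) (r0 : List (List Char)) :
    l.foldl (fun r _ => s :: (r ++ [s])) r0
      = List.replicate l.length s ++ r0 ++ List.replicate l.length s := by
  induction l generalizing r0 with
  | nil => simp
  | cons x t ih =>
    have key : ∀ (n : Nat) (X : List (List Char)),
        List.replicate n s ++ s :: X = s :: (List.replicate n s ++ X) := by
      intro n X
      rw [← List.singleton_append, ← List.append_assoc, ← List.replicate_succ',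
        List.replicate_succ, List.cons_append]
    simp only [List.foldl_cons, ih, List.length_cons, List.replicate_succ]
    simp only [List.append_assoc, List.cons_append]
    rw [key]
    simp

-- A's outer fold produces the symmetric block list around the accumulator
lemma pvFoldA (fs : List Int) (acc : List (List Char)) (m : Int) :
    fs.foldl
      (fun (st : List (List Char) × Int) (i : Int) =>
        ((PySem.List.pyRange 0 (PySem.Int.floordiv i 2) 1).foldl
           (fun r _ => PySem.Int.toChars st.2 :: (r ++ [PySem.Int.toChars st.2])) st.1,
         st.2 - 1))
      (acc, m)
      = (pvW fs m ++ acc ++ (pvW fs m).reverse, m - fs.length) := by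
  induction fs generalizing acc m with
  | nil => simp [pvW]
  | cons f t ih =>
    rw [List.foldl_cons]
    have hstep :
        ((PySem.List.pyRange 0 (PySem.Int.floordiv f 2) 1).foldl
           (fun r _ => PySem.Int.toChars m :: (r ++ [PySem.Int.toChars m])) acc,
         m - 1)
        = (pvBlk m f ++ acc ++ pvBlk m f, m - 1) := by
      rw [pvInner]
      simp [pvBlk, PySem.List.length_pyRange_one]
    rw [hstep, ih]
    refine Prod.ext ?_ ?_
    · simp [pvW, List.reverse_append, List.reverse_replicate, pvBlk, List.append_assoc]
    · simp only [List.length_cons]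
      push_cast
      ring

-- pvW of the reversed list lists the blocks in index order m, m+1, …
lemma pvW_reverse (g : List Int) (m : Nat) :
    pvW g.reverse ((m : Int) + g.length - 1)
      = ((List.range g.length).map (fun (i : Nat) => pvBlk ((m : Int) + i) (g.getD i 0))).flatten := by
  induction g generalizing m with
  | nil => simp [pvW]
  | cons x t ih =>
    have hsplit : ∀ (as bs : List Int) (M : Int),
        pvW (as ++ bs) M = pvW bs (M - as.length) ++ pvW as M := by
      intro as
      induction as with
      | nil => intro bs M; simp [pvW]
      | cons a as' ih2 =>
        intro bs M
        simp only [List.cons_append, pvW, ih2]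
        simp only [List.length_cons, List.append_assoc]
        congr 2
        push_cast
        ring_nf
    rw [List.reverse_cons, hsplit]
    have hidx : ((m : Int) + (x :: t).length - 1 - t.reverse.length) = (m : Int) := by
      simp only [List.length_reverse, List.length_cons]
      push_cast; ring
    have h1 : pvW [x] ((m : Int) + (x :: t).length - 1 - t.reverse.length) = pvBlk m x := by
      rw [hidx]; simp [pvW]
    have h2 : (m : Int) + (x :: t).length - 1 = ((m + 1 : Nat) : Int) + t.length - 1 := by
      simp only [List.length_cons]
      push_cast; ring
    rw [h1, h2, ih (m + 1)]
    simp only [List.length_cons]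
    rw [List.range_succ_eq_map]
    simp only [List.map_cons, List.map_map, List.flatten_cons]
    congr 1
    refine congrArg List.flatten (List.map_congr_left ?_)
    intro i _
    show pvBlk (((m + 1 : Nat) : Int) + i) (t.getD i 0)
        = pvBlk ((m : Int) + ((i + 1 : Nat) : Int)) ((x :: t).getD (i + 1) 0)
    have hv : (x :: t).getD (i + 1) 0 = t.getD i 0 := rfl
    rw [hv]
    congr 1
    push_cast; ring

-- ''.join as a fold is flatten
lemma pvFoldAppend (l : List (List Char)) (a : List Char) :
    l.foldl (fun a s => a ++ s) a = a ++ l.flatten := by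
  induction l generalizing a with
  | nil => simp
  | cons x t ih => simp [List.foldl_cons, ih]

-- str(i) * k , read on the char side, is the flattened block
lemma pvRepeat_eq (cs : List Char) (k : Int) :
    PySem.List.pyRepeat cs k = (List.replicate k.toNat cs).flatten := by
  simp [PySem.List.pyRepeat]

-- ===== VERDICT (by name: the statement is the Claim_ definition above) =====
theorem solution_spec : Claim_equal_solution := by
  intro food _
  show solution food = solution_alt food
  simp only [solution, solution_alt]
  rw [pvFoldA, pvFoldAppend]
  congr 1
  simp only [PySem.List.len_eq, List.nil_append, PySem.List.pyGetD_natCast]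
  have h0 : PySem.Int.toChars 0 = ['0'] := by decide
  rw [h0]
  set M := (List.range food.length).map (fun (i : Nat) => pvBlk (i : Int) (food.getD i 0)) with hMdef
  have hW : pvW food.reverse ((food.length : Int) - 1) = M.flatten := by
    have := pvW_reverse food 0
    simpa [hMdef] using this
  rw [hW]
  have hB : (List.range food.length).map
      (fun (i : Nat) => PySem.List.pyRepeat (PySem.Int.toChars (i : Int))
        (PySem.Int.floordiv (food.getD i 0) 2))
      = M.map List.flatten := by
    rw [hMdef, List.map_map]
    apply List.map_congr_left
    intro i _
    simp only [Function.comp]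
    rw [pvRepeat_eq]
    simp [pvBlk]
  rw [hB]
  have hRevRep : M.map List.reverse = M := by
    rw [hMdef, List.map_map]
    apply List.map_congr_left
    intro i _
    simp [Function.comp, pvBlk, List.reverse_replicate]
  have hRev : M.flatten.reverse = M.reverse.flatten := by
    have : M.flatten.reverse = (M.map List.reverse).reverse.flatten := by
      simp [List.reverse_flatten]
    rw [this, hRevRep]
  rw [List.flatten_append, List.flatten_append, List.flatten_flatten, hRev,
    List.flatten_flatten, List.map_reverse]
  simp
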